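-- pv_equiv track=rewrite | github.com/PPPSDavid/rust-based-prefect | python-shim/src/prefect_compat/runtime.py | _aggregate_state
-- ===== SOURCE A (Python) =====
-- def _aggregate_state(states: list[str]) -> str:
--     if not states:
--         return "PENDING"
--     priority = ["FAILED", "CANCELLED", "RUNNING", "PENDING", "SCHEDULED", "COMPLETED"]
--     for state in priority:
--         if state in states:
--             return state
--     return states[-1]
-- ===== SOURCE B (Python) =====
-- def _aggregate_state(states: list[str]) -> str:
--     if not states:
--         return "PENDING"
--     priority = ["FAILED", "CANCELLED", "RUNNING", "PENDING", "SCHEDULED", "COMPLETED"]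
--     rank = {s: i for i, s in enumerate(priority)}
--     best = None
--     for s in states:
--         r = rank.get(s)
--         if r is not None and (best is None or r < best):
--             best = r
--     return priority[best] if best is not None else states[-1]
-- ===== Notes on version B (the rewrite author's own statement) =====
-- stated objective: alternative
-- what changed: Inverts the traversal: instead of scanning the fixed priority list and testing membership in states for each entry, B builds a rank dictionary once and makes a single pass over states maintaining the minimum rank seen, indexing back into priority at the end.
import Mathlib
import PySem

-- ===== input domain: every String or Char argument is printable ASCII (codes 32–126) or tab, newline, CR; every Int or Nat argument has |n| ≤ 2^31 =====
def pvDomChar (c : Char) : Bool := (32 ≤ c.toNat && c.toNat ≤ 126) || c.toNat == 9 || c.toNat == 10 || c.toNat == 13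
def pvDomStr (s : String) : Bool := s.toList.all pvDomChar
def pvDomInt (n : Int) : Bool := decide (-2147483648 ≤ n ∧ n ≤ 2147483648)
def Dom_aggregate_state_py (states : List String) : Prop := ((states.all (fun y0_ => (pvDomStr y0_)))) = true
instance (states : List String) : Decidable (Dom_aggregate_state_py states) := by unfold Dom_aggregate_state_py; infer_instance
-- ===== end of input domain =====

-- B replaces A's ordered scan of the priority list (membership test per entry) by one pass
-- over `states` keeping the minimum priority rank, via a rank dictionary; same return value.

-- ===== PORT A =====
def pvPriorityA : List String := ["FAILED", "CANCELLED", "RUNNING", "PENDING", "SCHEDULED", "COMPLETED"]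

-- the early-returning `for state in priority` loop of A
def pvScanA (pr : List String) (states : List String) : Option String :=
  match pr with
  | [] => none
  | p :: rest => if states.contains p then some p else pvScanA rest states

def aggregate_state_py (states : List String) : String :=
  if states.isEmpty then "PENDING"
  else
    match pvScanA pvPriorityA states with
    | some s => s
    | none => (PySem.List.pyGet? states (-1)).getD ""   -- states[-1]; nonempty here, never none

-- ===== PORT B =====
def pvPriorityB : List String := ["FAILED", "CANCELLED", "RUNNING", "PENDING", "SCHEDULED", "COMPLETED"]

-- rank = {s: i for i, s in enumerate(priority)}
def pvRankB : PySem.Dict String Int :=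
  (PySem.List.enumerate pvPriorityB 0).foldl (fun d p => d.insert p.2 p.1) PySem.Dict.empty

-- loop body: r = rank.get(s); if r is not None and (best is None or r < best): best = r
def pvBestStep (best : Option Int) (s : String) : Option Int :=
  match pvRankB.get? s with
  | none => best
  | some r =>
    match best with
    | none => some r
    | some b => if r < b then some r else best

def aggregate_state_py_alt (states : List String) : String :=
  if states.isEmpty then "PENDING"
  else
    match states.foldl pvBestStep none with
    | some b => (PySem.List.pyGet? pvPriorityB b).getD ""
    | none => (PySem.List.pyGet? states (-1)).getD ""   -- states[-1]; nonempty here, never none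

-- ===== PRECONDITION & SPEC =====
def Spec_aggregate_state_py (states : List String) (out : String) : Prop := out = aggregate_state_py_alt states
instance (states : List String) (out : String) : Decidable (Spec_aggregate_state_py states out) := by unfold Spec_aggregate_state_py; infer_instance

-- ===== CLAIM (what is proved, stated in full; the proofs are below) =====
def Claim_equal_aggregate_state_py : Prop := ∀ (states : List String), Dom_aggregate_state_py states → Spec_aggregate_state_py states (aggregate_state_py states)

-- ===== LEMMAS AND PROOFS =====

def pvRanks (states : List String) : List Int := states.filterMap (fun s => pvRankB.get? s)

theorem pvRank_char (s : String) :
    pvRankB.get? s =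
      if "FAILED" = s then some 0 else if "CANCELLED" = s then some 1 else
      if "RUNNING" = s then some 2 else if "PENDING" = s then some 3 else
      if "SCHEDULED" = s then some 4 else if "COMPLETED" = s then some 5 else none := by
  have h : pvRankB = PySem.Dict.mk [("FAILED", (0:Int)), ("CANCELLED", 1), ("RUNNING", 2),
      ("PENDING", 3), ("SCHEDULED", 4), ("COMPLETED", 5)] := by decide
  rw [h]
  simp only [PySem.Dict.get?_mk_cons, beq_iff_eq]
  simp [PySem.Dict.get?]

theorem pvFold_eq_ranks (states : List String) (acc : Option Int) :
    states.foldl pvBestStep acc =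
      (pvRanks states).foldl
        (fun o r => match o with | none => some r | some b => if r < b then some r else some b) acc := by
  induction states generalizing acc with
  | nil => rfl
  | cons s rest ih =>
    simp only [pvRanks, List.filterMap_cons, List.foldl_cons]
    cases h : pvRankB.get? s with
    | none => simpa [pvBestStep, h, pvRanks] using ih acc
    | some r =>
      cases acc with
      | none => simpa [pvBestStep, h, pvRanks] using ih (some r)
      | some b =>
        by_cases hrb : r < b
        · simpa [pvBestStep, h, hrb, pvRanks] using ih (some r)
        · simpa [pvBestStep, h, hrb, pvRanks] using ih (some b)

theorem pvFold_min_aux (l : List Int) (a : Int) :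
    l.foldl (fun o r => match o with | none => some r | some b => if r < b then some r else some b) (some a)
      = some (l.foldl min a) := by
  induction l generalizing a with
  | nil => rfl
  | cons r rest ih =>
    have h : (if r < a then some r else some a) = some (min a r) := by
      rcases lt_or_ge r a with hh | hh
      · rw [if_pos hh]; congr 1; omega
      · rw [if_neg (not_lt.mpr hh)]; congr 1; omega
    simp only [List.foldl_cons, h, ih]

theorem pvFold_min (states : List String) :
    states.foldl pvBestStep none = (pvRanks states).min? := by
  rw [pvFold_eq_ranks]
  cases h : pvRanks states with
  | nil => rfl
  | cons a l => simp [List.min?, pvFold_min_aux]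

theorem pvMem_of_rank {states : List String} {p : String} {r : Int}
    (hp : p ∈ states) (hr : pvRankB.get? p = some r) : r ∈ pvRanks states :=
  List.mem_filterMap.mpr ⟨p, hp, hr⟩

-- ===== VERDICT (by name: the statement is the Claim_ definition above) =====
theorem aggregate_state_py_spec : Claim_equal_aggregate_state_py := by
  intro states _
  unfold Spec_aggregate_state_py aggregate_state_py aggregate_state_py_alt
  by_cases hne : states.isEmpty
  · simp [hne]
  · simp only [hne, Bool.false_eq_true, if_false]
    rw [pvFold_min]
    cases hmin : (pvRanks states).min? with
    | none =>
      have hnil : pvRanks states = [] := List.min?_eq_none_iff.mp hmin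
      have hnone : ∀ s ∈ states, pvRankB.get? s = none := by
        intro s hs
        cases h : pvRankB.get? s with
        | none => rfl
        | some r =>
          exact absurd (hnil ▸ pvMem_of_rank hs h) (List.not_mem_nil)
      have h0 : "FAILED" ∉ states := fun h => by simpa [pvRank_char] using hnone _ h
      have h1 : "CANCELLED" ∉ states := fun h => by simpa [pvRank_char] using hnone _ h
      have h2 : "RUNNING" ∉ states := fun h => by simpa [pvRank_char] using hnone _ h
      have h3 : "PENDING" ∉ states := fun h => by simpa [pvRank_char] using hnone _ h
      have h4 : "SCHEDULED" ∉ states := fun h => by simpa [pvRank_char] using hnone _ h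
      have h5 : "COMPLETED" ∉ states := fun h => by simpa [pvRank_char] using hnone _ h
      simp [pvScanA, pvPriorityA, h0, h1, h2, h3, h4, h5]
    | some r =>
      obtain ⟨hmem, hmin'⟩ := List.min?_eq_some_iff.mp hmin
      obtain ⟨s, hs, hrs⟩ := List.mem_filterMap.mp hmem
      have hnotlt : ∀ (p : String) (j : Int), pvRankB.get? p = some j → j < r → p ∉ states := by
        intro p j hj hjr hp
        exact absurd (hmin' j (pvMem_of_rank hp hj)) (by omega)
      rw [pvRank_char] at hrs
      split_ifs at hrs <;> injection hrs with hr <;> subst hr <;> subst_vars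
      · simp [pvScanA, pvPriorityA, pvPriorityB, hs, PySem.List.pyGet?]
        decide
      · have h0 := hnotlt "FAILED" 0 (by decide) (by omega)
        simp [pvScanA, pvPriorityA, pvPriorityB, hs, h0, PySem.List.pyGet?]
        decide
      · have h0 := hnotlt "FAILED" 0 (by decide) (by omega)
        have h1 := hnotlt "CANCELLED" 1 (by decide) (by omega)
        simp [pvScanA, pvPriorityA, pvPriorityB, hs, h0, h1, PySem.List.pyGet?]
        decide
      · have h0 := hnotlt "FAILED" 0 (by decide) (by omega)
        have h1 := hnotlt "CANCELLED" 1 (by decide) (by omega)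
        have h2 := hnotlt "RUNNING" 2 (by decide) (by omega)
        simp [pvScanA, pvPriorityA, pvPriorityB, hs, h0, h1, h2, PySem.List.pyGet?]
        decide
      · have h0 := hnotlt "FAILED" 0 (by decide) (by omega)
        have h1 := hnotlt "CANCELLED" 1 (by decide) (by omega)
        have h2 := hnotlt "RUNNING" 2 (by decide) (by omega)
        have h3 := hnotlt "PENDING" 3 (by decide) (by omega)
        simp [pvScanA, pvPriorityA, pvPriorityB, hs, h0, h1, h2, h3, PySem.List.pyGet?]
        decide
      · have h0 := hnotlt "FAILED" 0 (by decide) (by omega)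
        have h1 := hnotlt "CANCELLED" 1 (by decide) (by omega)
        have h2 := hnotlt "RUNNING" 2 (by decide) (by omega)
        have h3 := hnotlt "PENDING" 3 (by decide) (by omega)
        have h4 := hnotlt "SCHEDULED" 4 (by decide) (by omega)
        simp [pvScanA, pvPriorityA, pvPriorityB, hs, h0, h1, h2, h3, h4, PySem.List.pyGet?]
        decide
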